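-- pv_equiv track=rewrite | github.com/protabit/protherm-conversion | utils/sequence.py | valid_protein_sequence
-- ===== SOURCE A (Python) =====
-- ACCEPTEDAA=['A','C','D','E','F','G','H','I','K','L','M','N','P','Q','R','S','T','V','W','Y']
--
-- def valid_protein_sequence(seq):
--     """
--     seq -- is a string of characters, checks if the sequence is allowed
--     """
--     if seq is None or seq=="":
--         return False
--     for chain in seq.split("/"):
--         chain_sequence=chain[(chain.find(':')+1):]
--         for letter in chain_sequence:
--             if letter not in ACCEPTEDAA:
--                 return False
--     return True
-- ===== SOURCE B (Python) =====
-- _AA = frozenset('ACDEFGHIKLMNPQRSTVWY')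
--
-- def valid_protein_sequence(seq):
--     """
--     seq -- is a string of characters, checks if the sequence is allowed
--     """
--     if seq is None or seq == "":
--         return False
--     seen_colon = False   # current chain already passed its first ':'
--     prefix_ok = True     # chars before a (potential) first ':' are all amino acids
--     for c in seq:
--         if c == '/':                 # chain boundary: settle the finished chain
--             if not seen_colon and not prefix_ok:
--                 return False
--             seen_colon = False
--             prefix_ok = True
--         elif seen_colon:             # past the first ':' every char must be an amino acid
--             if c not in _AA:
--                 return False
--         elif c == ':':               # first ':' of the chain: the prefix is forgiven
--             seen_colon = True
--         elif c not in _AA:           # pre-colon char; invalid unless a ':' comes later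
--             prefix_ok = False
--     return seen_colon or prefix_ok
-- ===== Notes on version B (the rewrite author's own statement) =====
-- stated objective: alternative
-- what changed: Replaced the split-into-chains, find-then-slice, per-letter list-membership structure by a single left-to-right state-machine pass over the raw string (flags: first colon of the current chain seen, prefix still valid), building no intermediate chain list or slices.
import Mathlib
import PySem

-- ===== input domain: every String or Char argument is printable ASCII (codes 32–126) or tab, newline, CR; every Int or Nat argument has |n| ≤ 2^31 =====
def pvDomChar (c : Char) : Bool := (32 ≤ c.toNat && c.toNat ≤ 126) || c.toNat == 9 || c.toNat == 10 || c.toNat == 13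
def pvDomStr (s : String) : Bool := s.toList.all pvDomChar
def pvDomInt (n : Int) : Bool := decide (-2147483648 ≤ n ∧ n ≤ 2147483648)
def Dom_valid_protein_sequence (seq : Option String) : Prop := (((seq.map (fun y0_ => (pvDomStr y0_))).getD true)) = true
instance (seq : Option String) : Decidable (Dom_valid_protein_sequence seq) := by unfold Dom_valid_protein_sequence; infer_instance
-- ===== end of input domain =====

-- B replaces A's split-into-chains + per-chain find/slice + per-letter membership loop by one
-- left-to-right state-machine pass over the raw string (objective: alternative algorithm;
-- no intermediate chain list or slices are built).

-- ===== PORT A =====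
-- ACCEPTEDAA: Python list of one-character strings; membership of a letter in it is
-- exactly membership of its character in this list.
def pvAcceptedAA : List Char :=
  ['A','C','D','E','F','G','H','I','K','L','M','N','P','Q','R','S','T','V','W','Y']

-- inner loop: 'for letter in chain_sequence: if letter not in ACCEPTEDAA: return False'
def pvChainLoopA : List Char → Bool
  | [] => true
  | c :: rest => if ¬ (c ∈ pvAcceptedAA) then false else pvChainLoopA rest

-- outer loop: 'for chain in seq.split("/")' with early return False
def pvChainsLoopA : List String → Bool
  | [] => true
  | chain :: rest =>
      let chain_sequence := PySem.Str.slice chain (some (PySem.Str.find chain ":" + 1)) none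
      if ¬ pvChainLoopA chain_sequence.toList then false else pvChainsLoopA rest

def valid_protein_sequence (seq : Option String) : Bool :=
  match seq with
  | none => false
  | some s => if s = "" then false else pvChainsLoopA (((PySem.Str.split? s "/").getD []))

-- ===== PORT B =====
-- the frozenset _AA of Source B (distinct characters, so a PySem.Set as a plain list)
def pvAASet : List Char := "ACDEFGHIKLMNPQRSTVWY".toList

-- the 'for c in seq' state machine of Source B: state = (seen_colon, prefix_ok), early return False
def pvLoopB : List Char → Bool → Bool → Bool
  | [], seenColon, prefixOk => seenColon || prefixOk
  | c :: rest, seenColon, prefixOk =>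
      if c = '/' then
        if ¬ seenColon ∧ ¬ prefixOk then false else pvLoopB rest false true
      else if seenColon then
        if ¬ (c ∈ pvAASet) then false else pvLoopB rest seenColon prefixOk
      else if c = ':' then
        pvLoopB rest true prefixOk
      else if ¬ (c ∈ pvAASet) then
        pvLoopB rest seenColon false
      else
        pvLoopB rest seenColon prefixOk

def valid_protein_sequence_alt (seq : Option String) : Bool :=
  match seq with
  | none => false
  | some s => if s = "" then false else pvLoopB s.toList false true

-- ===== PRECONDITION & SPEC =====
def Spec_valid_protein_sequence (seq : Option String) (out : Bool) : Prop := out = valid_protein_sequence_alt seq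
instance (seq : Option String) (out : Bool) : Decidable (Spec_valid_protein_sequence seq out) := by unfold Spec_valid_protein_sequence; infer_instance

-- ===== CLAIM (what is proved, stated in full; the proofs are below) =====
def Claim_equal_valid_protein_sequence : Prop := ∀ (seq : Option String), Dom_valid_protein_sequence seq → Spec_valid_protein_sequence seq (valid_protein_sequence seq)

-- ===== LEMMAS AND PROOFS =====

-- reference split on '/': cons-style structural recursion
def pvSplit : List Char → List (List Char)
  | [] => [[]]
  | c :: r => if c = '/' then [] :: pvSplit r
              else match pvSplit r with
                   | [] => [[c]]
                   | h :: t => (c :: h) :: t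

-- per-chain value of B's machine, as a structural recursion on the chain
def pvChainVal : List Char → Bool → Bool
  | [], ok => ok
  | c :: r, ok => if c = ':' then r.all (· ∈ pvAASet) else pvChainVal r (ok && (c ∈ pvAASet))

theorem pvSplit_ne_nil (cs : List Char) : pvSplit cs ≠ [] := by
  cases cs with
  | nil => simp [pvSplit]
  | cons c r =>
      simp only [pvSplit]
      split_ifs
      · simp
      · cases pvSplit r <;> simp

theorem pvAA_eq : pvAASet = pvAcceptedAA := by decide

theorem pvChainLoopA_eq_all (cs : List Char) :
    pvChainLoopA cs = cs.all (· ∈ pvAASet) := by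
  induction cs with
  | nil => rfl
  | cons c rest ih =>
      by_cases h : c ∈ pvAcceptedAA <;> simp [pvChainLoopA, h, ih, pvAA_eq]

-- B's machine computes, chain by chain, pvChainVal over pvSplit
theorem pvLoopB_split (cs : List Char) :
    (∀ ok, pvLoopB cs false ok =
      (match pvSplit cs with
        | [] => true
        | h :: t => pvChainVal h ok && t.all (fun ch => pvChainVal ch true))) ∧
    (∀ ok, pvLoopB cs true ok =
      (match pvSplit cs with
        | [] => true
        | h :: t => h.all (· ∈ pvAASet) && t.all (fun ch => pvChainVal ch true))) := by
  induction cs with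
  | nil => constructor <;> intro ok <;> simp [pvLoopB, pvSplit, pvChainVal]
  | cons c r ih =>
      obtain ⟨ihF, ihT⟩ := ih
      by_cases hs : c = '/'
      · subst hs
        constructor <;> intro ok <;>
          simp only [pvLoopB, pvSplit, if_pos rfl, List.all_cons, pvChainVal] <;>
          rcases hr : pvSplit r with _ | ⟨h, t⟩
        · exact absurd hr (pvSplit_ne_nil r)
        · rw [ihF true, hr]; cases ok <;> simp [pvChainVal]
        · exact absurd hr (pvSplit_ne_nil r)
        · rw [ihF true, hr]; simp [pvChainVal]
      · by_cases hc : c = ':'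
        · subst hc
          constructor <;> intro ok
          · simp only [pvLoopB, if_neg hs, if_pos rfl]
            rw [ihT ok]
            rcases hr : pvSplit r with _ | ⟨h, t⟩
            · exact absurd hr (pvSplit_ne_nil r)
            · simp [pvSplit, hr, pvChainVal]
          · simp only [pvLoopB, if_neg hs]
            have hns : (':' : Char) ∉ pvAASet := by decide
            simp only [hns, not_false_eq_true, if_pos, if_true]
            rcases hr : pvSplit r with _ | ⟨h, t⟩
            · exact absurd hr (pvSplit_ne_nil r)
            · simp [pvSplit, hr, if_neg hs, List.all_cons, hns]
        · constructor <;> intro ok <;>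
            simp only [pvLoopB, if_neg hs, if_neg hc] <;>
            rcases hr : pvSplit r with _ | ⟨h, t⟩
          · exact absurd hr (pvSplit_ne_nil r)
          · by_cases hm : c ∈ pvAASet
            · simp only [hm, not_true_eq_false, if_neg, if_pos]
              rw [ihF ok, hr]
              simp [pvSplit, hr, if_neg hs, if_neg hc, pvChainVal, hm, hc]
            · simp only [hm, not_false_eq_true, if_pos]
              rw [ihF false, hr]
              simp [pvSplit, hr, if_neg hs, if_neg hc, pvChainVal, hm, hc]
          · exact absurd hr (pvSplit_ne_nil r)
          · by_cases hm : c ∈ pvAASet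
            · simp only [hm, not_true_eq_false, if_neg, if_pos]
              rw [ihT ok, hr]
              simp [pvSplit, hr, if_neg hs, if_neg hc, List.all_cons, hm]
            · simp only [hm, not_false_eq_true, if_pos]
              simp [pvSplit, hr, if_neg hs, if_neg hc, List.all_cons, hm]

-- pvChainVal on a colon-free chain
theorem pvChainVal_no_colon (cs : List Char) (h : ':' ∉ cs) (ok : Bool) :
    pvChainVal cs ok = (ok && cs.all (· ∈ pvAASet)) := by
  induction cs generalizing ok with
  | nil => simp [pvChainVal]
  | cons c r ih =>
      simp only [List.mem_cons, not_or] at h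
      have hc : c ≠ ':' := fun e => h.1 e.symm
      simp [pvChainVal, hc, ih h.2, Bool.and_assoc, List.all_cons, Bool.and_comm (c ∈ pvAASet)]

-- pvChainVal when the first ':' sits at index k
theorem pvChainVal_first_colon (cs : List Char) (k : Nat)
    (hk : cs[k]? = some ':') (hlt : ∀ i, i < k → cs[i]? ≠ some ':') (ok : Bool) :
    pvChainVal cs ok = (cs.drop (k+1)).all (· ∈ pvAASet) := by
  induction cs generalizing k ok with
  | nil => simp at hk
  | cons c r ih =>
      cases k with
      | zero => simp at hk; simp [pvChainVal, hk]
      | succ k =>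
          have hc : c ≠ ':' := by
            have := hlt 0 (Nat.succ_pos k); simpa using this
          simp only [List.getElem?_cons_succ] at hk
          have hlt' : ∀ i, i < k → r[i]? ≠ some ':' := by
            intro i hi
            have := hlt (i+1) (by omega); simpa using this
          simp [pvChainVal, hc, ih k hk hlt']

-- A's per-chain computation (find ':' then slice) equals pvChainVal _ true
theorem pvChainA_eq_chainVal (t : List Char) :
    pvChainLoopA (PySem.List.slice t (some (PySem.Chars.find t [':'] + 1)) none) =
      pvChainVal t true := by
  by_cases hmem : ':' ∈ t
  · have hge : 0 ≤ PySem.Chars.find t [':'] := by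
      rw [PySem.Chars.find_nonneg_iff]
      exact (List.singleton_infix_iff ':' t).mpr hmem
    obtain ⟨hpre, hmin⟩ := PySem.Chars.find_spec hge
    set k := (PySem.Chars.find t [':']).toNat with hk
    have hkk : t[k]? = some ':' := by
      rw [← List.head?_drop]
      rcases hpre with ⟨suf, hsuf⟩
      rw [← hsuf]; rfl
    have hminIdx : ∀ i, i < k → t[i]? ≠ some ':' := by
      intro i hi he
      apply hmin i hi
      rw [← List.head?_drop] at he
      rcases hd : t.drop i with _ | ⟨c, rest⟩
      · simp [hd] at he
      · simp [hd] at he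
        rw [he]
        exact ⟨rest, rfl⟩
    have hslice : PySem.List.slice t (some (PySem.Chars.find t [':'] + 1)) none
        = t.drop (k+1) := by
      rw [PySem.List.slice_from _ (by omega)]
      congr 1
      omega
    rw [hslice, pvChainLoopA_eq_all, pvChainVal_first_colon t k hkk hminIdx]
  · have hne : PySem.Chars.find t [':'] = -1 := by
      rw [PySem.Chars.find_eq_neg_one_iff]
      rw [List.singleton_infix_iff]
      exact hmem
    rw [hne]
    norm_num
    rw [pvChainLoopA_eq_all, pvChainVal_no_colon t hmem]
    simp

-- splitOn.go with single-char separator '/' computes pvSplit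
theorem pvSplitOn_go (cs : List Char) :
    ∀ fuel cur acc, cs.length ≤ fuel →
      PySem.Chars.splitOn.go ['/'] fuel cs cur acc =
        acc.reverse ++ (match pvSplit cs with
          | [] => [cur.reverse]
          | h :: t => (cur.reverse ++ h) :: t) := by
  induction cs with
  | nil =>
      intro fuel cur acc _
      cases fuel <;> simp [PySem.Chars.splitOn.go, pvSplit]
  | cons c r ih =>
      intro fuel cur acc hf
      cases fuel with
      | zero => simp at hf
      | succ f =>
          rw [PySem.Chars.splitOn.go.eq_def]
          simp only []
          by_cases hs : c = '/'
          · subst hs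
            have hp : (['/'] : List Char).isPrefixOf ('/' :: r) = true := by
              simp [List.isPrefixOf]
            simp only [hp, if_pos, List.length_cons, List.length_nil, List.drop_succ_cons, List.drop_zero] at *
            rw [ih f [] (cur.reverse :: acc) (by simpa using Nat.le_of_succ_le_succ hf)]
            rcases hr : pvSplit r with _ | ⟨h, t⟩
            · exact absurd hr (pvSplit_ne_nil r)
            · simp [pvSplit, hr]
          · have hp : (['/'] : List Char).isPrefixOf (c :: r) = false := by
              simp [List.isPrefixOf]
              intro h; exact hs h.symm
            simp only [hp, Bool.false_eq_true, if_false]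
            rw [ih f (c :: cur) acc (by simpa using Nat.le_of_succ_le_succ hf)]
            rcases hr : pvSplit r with _ | ⟨h, t⟩
            · exact absurd hr (pvSplit_ne_nil r)
            · simp [pvSplit, hr, hs]

theorem pvSplitOn_eq (cs : List Char) :
    PySem.Chars.splitOn cs ['/'] = pvSplit cs := by
  unfold PySem.Chars.splitOn
  rw [pvSplitOn_go cs (cs.length + 1) [] [] (by omega)]
  rcases hr : pvSplit cs with _ | ⟨h, t⟩
  · exact absurd hr (pvSplit_ne_nil cs)
  · simp

-- outer loop of A as an all over the chains' char lists
theorem pvChainsLoopA_eq_all (l : List String) :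
    pvChainsLoopA l = (l.map String.toList).all
      (fun t => pvChainVal t true) := by
  induction l with
  | nil => rfl
  | cons chain rest ih =>
      simp only [pvChainsLoopA, List.map_cons, List.all_cons, ih]
      have h : pvChainLoopA (PySem.Str.slice chain (some (PySem.Str.find chain ":" + 1)) none).toList
          = pvChainVal chain.toList true := by
        have := pvChainA_eq_chainVal chain.toList
        simpa [PySem.Str.toList_slice] using this
      rw [h]
      split_ifs with hh <;> simp_all

-- ===== VERDICT (by name: the statement is the Claim_ definition above) =====
theorem valid_protein_sequence_spec : Claim_equal_valid_protein_sequence := by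
  intro seq _
  unfold Spec_valid_protein_sequence valid_protein_sequence valid_protein_sequence_alt
  cases seq with
  | none => rfl
  | some s =>
      by_cases hemp : s = ""
      · simp [hemp]
      · simp only [hemp, if_false]
        have hmap := PySem.Str.split?_map s "/"
        have hsep : ("/" : String).toList = ['/'] := by decide
        rw [hsep] at hmap
        have hsplit : PySem.Chars.split? s.toList ['/'] = some (pvSplit s.toList) := by
          simp [PySem.Chars.split?, pvSplitOn_eq]
        rw [hsplit] at hmap
        cases hsp : PySem.Str.split? s "/" with
        | none => rw [hsp] at hmap; simp at hmap
        | some l =>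
            rw [hsp] at hmap
            simp only [Option.map_some, Option.some.injEq] at hmap
            simp only [Option.getD_some]
            rw [pvChainsLoopA_eq_all, hmap]
            rw [(pvLoopB_split s.toList).1 true]
            rcases hr : pvSplit s.toList with _ | ⟨h, t⟩
            · exact absurd hr (pvSplit_ne_nil s.toList)
            · simp
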